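-- pv_equiv track=rewrite | github.com/baesh3744/algorithm-solutions | baekjoon/12000/12849.py | get_path_count
-- ===== SOURCE A (Python) =====
-- from typing import Final, List
--
-- MOD: Final[int] = 1000000007
--
-- def get_path_count(D: int) -> int:
--     # cache[D][hall] - D분일 때, hall에 위치하는 경우의 수
--     # 0 정보과학관      4 환경직기념관
--     # 1 전산관          5 진리관
--     # 2 미래관          6 학생회관
--     # 3 신양관          7 형남공학관
--     cache: List[List[int]] = [[0 for _ in range(8)] for _ in range(D + 1)]
--     paths: List[List[int]] = [[1, 2], [0, 2, 3], [0, 1, 3, 4],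
--                               [1, 2, 4, 5], [2, 3, 5, 7], [3, 4, 6], [5, 7], [4, 6]]
--
--     for d in range(D + 1):
--         if d == 0:
--             cache[d][0] = 1
--         else:
--             for cur_hall, next_halls in enumerate(paths):
--                 for next_hall in next_halls:
--                     cache[d][cur_hall] += cache[d - 1][next_hall]
--                 cache[d][cur_hall] %= MOD
--     return cache[D][0]
-- ===== SOURCE B (Python) =====
-- from typing import Final, List
--
-- MOD: Final[int] = 1000000007
--
-- # 8x8 adjacency matrix of the fixed hall graph (hall i connects to paths[i])
-- ADJ: Final[List[List[int]]] = [
--     [0, 1, 1, 0, 0, 0, 0, 0],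
--     [1, 0, 1, 1, 0, 0, 0, 0],
--     [1, 1, 0, 1, 1, 0, 0, 0],
--     [0, 1, 1, 0, 1, 1, 0, 0],
--     [0, 0, 1, 1, 0, 1, 0, 1],
--     [0, 0, 0, 1, 1, 0, 1, 0],
--     [0, 0, 0, 0, 0, 1, 0, 1],
--     [0, 0, 0, 0, 1, 0, 1, 0],
-- ]
--
-- def mat_mult(X: List[List[int]], Y: List[List[int]]) -> List[List[int]]:
--     return [[sum(X[i][k] * Y[k][j] for k in range(8)) % MOD
--              for j in range(8)] for i in range(8)]
--
-- def get_path_count(D: int) -> int: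
--     # answer = (ADJ ** D)[0][0] mod MOD, by binary exponentiation
--     result = [[1 if i == j else 0 for j in range(8)] for i in range(8)]
--     base = ADJ
--     e = D
--     while e > 0:
--         if e & 1:
--             result = mat_mult(result, base)
--         base = mat_mult(base, base)
--         e >>= 1
--     return result[0][0] % MOD
-- ===== Notes on version B (the rewrite author's own statement) =====
-- stated objective: faster
-- what changed: Replaced A's O(D) dynamic-programming table over all D+1 minutes by binary exponentiation of the fixed 8x8 adjacency matrix mod 1e9+7, returning (M^D)[0][0].
-- outside the precondition, e.g. on get_path_count(-1): A raises IndexError, B returns 1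
import Mathlib
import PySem

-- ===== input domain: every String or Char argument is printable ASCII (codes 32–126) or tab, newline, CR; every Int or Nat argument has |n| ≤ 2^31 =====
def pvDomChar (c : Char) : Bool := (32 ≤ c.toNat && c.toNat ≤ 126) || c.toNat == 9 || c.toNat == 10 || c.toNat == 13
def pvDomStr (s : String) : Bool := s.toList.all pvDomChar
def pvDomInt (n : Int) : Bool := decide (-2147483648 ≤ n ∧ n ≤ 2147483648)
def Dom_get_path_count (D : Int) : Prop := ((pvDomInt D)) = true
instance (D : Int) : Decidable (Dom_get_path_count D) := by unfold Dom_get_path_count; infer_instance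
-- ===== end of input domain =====

-- B replaces A's O(D) row-by-row dynamic programming over the fixed 8-hall graph by binary
-- exponentiation of its 8x8 adjacency matrix mod 1e9+7 (O(log D)); objective: faster.

-- ===== PORT A =====
def pvMOD : Int := 1000000007

def pvPaths : List (List Nat) := [[1, 2], [0, 2, 3], [0, 1, 3, 4],
                                  [1, 2, 4, 5], [2, 3, 5, 7], [3, 4, 6], [5, 7], [4, 6]]

-- the inner two loops of A for one minute d: from row d-1, sum the neighbours and reduce mod
def pvStepRow (prev : List Int) : List Int :=
  pvPaths.map (fun nexts => PySem.Int.mod (nexts.foldl (fun s j => s + prev.getD j 0) 0) pvMOD)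

-- A fills cache row by row, row d reading only row d-1; ported as appending each finished row.
-- All indices are literal non-negative ints, so plain getD is exact.
def get_path_count (D : Int) : Int :=
  let cache := (List.range (D.toNat + 1)).foldl
    (fun cache d =>
      if d = 0 then cache ++ [[1, 0, 0, 0, 0, 0, 0, 0]]
      else cache ++ [pvStepRow (cache.getD (d - 1) [])]) []
  (cache.getD D.toNat []).getD 0 0

-- ===== PORT B =====
def pvADJ : List (List Int) :=
  [[0, 1, 1, 0, 0, 0, 0, 0],
   [1, 0, 1, 1, 0, 0, 0, 0],
   [1, 1, 0, 1, 1, 0, 0, 0],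
   [0, 1, 1, 0, 1, 1, 0, 0],
   [0, 0, 1, 1, 0, 1, 0, 1],
   [0, 0, 0, 1, 1, 0, 1, 0],
   [0, 0, 0, 0, 0, 1, 0, 1],
   [0, 0, 0, 0, 1, 0, 1, 0]]

def pvIdent : List (List Int) :=
  [[1, 0, 0, 0, 0, 0, 0, 0],
   [0, 1, 0, 0, 0, 0, 0, 0],
   [0, 0, 1, 0, 0, 0, 0, 0],
   [0, 0, 0, 1, 0, 0, 0, 0],
   [0, 0, 0, 0, 1, 0, 0, 0],
   [0, 0, 0, 0, 0, 1, 0, 0],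
   [0, 0, 0, 0, 0, 0, 1, 0],
   [0, 0, 0, 0, 0, 0, 0, 1]]

def pvMatMult (X Y : List (List Int)) : List (List Int) :=
  (List.range 8).map (fun i => (List.range 8).map (fun j =>
    PySem.Int.mod ((List.range 8).foldl
      (fun s k => s + (X.getD i []).getD k 0 * (Y.getD k []).getD j 0) 0) pvMOD))

-- the while-loop of Source B on the (non-negative) remaining exponent e: e&1 = e%2, e>>=1 = e/2
def pvPowLoop : Nat → List (List Int) → List (List Int) → List (List Int)
  | 0, result, _ => result
  | (e + 1), result, base =>
      pvPowLoop ((e + 1) / 2)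
        (if (e + 1) % 2 = 1 then pvMatMult result base else result)
        (pvMatMult base base)
  decreasing_by exact Nat.div_lt_self (Nat.succ_pos e) (by omega)

def get_path_count_alt (D : Int) : Int :=
  PySem.Int.mod (((pvPowLoop D.toNat pvIdent pvADJ).getD 0 []).getD 0 0) pvMOD

-- ===== PRECONDITION & SPEC =====
-- A raises IndexError for D < 0 (cache has max(D+1,0) rows, so cache[D] is out of range).
def Pre_get_path_count (D : Int) : Prop := 0 ≤ D
instance (D : Int) : Decidable (Pre_get_path_count D) := by unfold Pre_get_path_count; infer_instance
def pvWitness_get_path_count : Int := (5)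

def Spec_get_path_count (D : Int) (out : Int) : Prop := out = get_path_count_alt D
instance (D : Int) (out : Int) : Decidable (Spec_get_path_count D out) := by unfold Spec_get_path_count; infer_instance

-- ===== CLAIM (what is proved, stated in full; the proofs are below) =====
def Claim_equal_get_path_count : Prop := ∀ (D : Int), Dom_get_path_count D → Pre_get_path_count D → Spec_get_path_count D (get_path_count D)

-- ===== LEMMAS AND PROOFS =====

-- the common semantic space: 8x8 matrices / 8-vectors over ZMod 1000000007
def pvToMat (X : List (List Int)) : Matrix (Fin 8) (Fin 8) (ZMod 1000000007) :=
  fun i j => (((X.getD i.val []).getD j.val 0 : Int) : ZMod 1000000007)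

def pvV0 : Fin 8 → ZMod 1000000007 := fun i => if i = 0 then 1 else 0

def pvARow : Nat → List Int
  | 0 => [1, 0, 0, 0, 0, 0, 0, 0]
  | (d + 1) => pvStepRow (pvARow d)

lemma pv_cast_mod (a : Int) :
    ((PySem.Int.mod a pvMOD : Int) : ZMod 1000000007) = (a : ZMod 1000000007) := by
  rw [PySem.Int.mod_eq_emod_of_pos (by norm_num [pvMOD])]
  exact_mod_cast ZMod.intCast_mod a 1000000007

lemma pv_getD_map_range {α : Type} (f : Nat → α) (d : α) (n i : Nat) (h : i < n) :
    ((List.range n).map f).getD i d = f i := by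
  rw [List.getD_eq_getElem _ _ (by simpa using h)]; simp

lemma pv_matMult_entry (X Y : List (List Int)) (i j : Nat) (hi : i < 8) (hj : j < 8) :
    ((pvMatMult X Y).getD i []).getD j 0 =
      PySem.Int.mod ((List.range 8).foldl
        (fun s k => s + (X.getD i []).getD k 0 * (Y.getD k []).getD j 0) 0) pvMOD := by
  unfold pvMatMult
  rw [pv_getD_map_range _ _ _ _ hi, pv_getD_map_range _ _ _ _ hj]

lemma pv_toMat_matMult (X Y : List (List Int)) :
    pvToMat (pvMatMult X Y) = pvToMat X * pvToMat Y := by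
  funext i j
  show (((pvMatMult X Y).getD i.val []).getD j.val 0 : ZMod 1000000007) = _
  rw [pv_matMult_entry X Y i.val j.val i.isLt j.isLt, pv_cast_mod,
      Matrix.mul_apply, Fin.sum_univ_eight]
  simp only [show (List.range 8) = [0,1,2,3,4,5,6,7] from by decide, List.foldl]
  unfold pvToMat
  simp only [show ((0:Fin 8):Nat) = 0 from rfl, show ((1:Fin 8):Nat) = 1 from rfl, show ((2:Fin 8):Nat) = 2 from rfl, show ((3:Fin 8):Nat) = 3 from rfl, show ((4:Fin 8):Nat) = 4 from rfl, show ((5:Fin 8):Nat) = 5 from rfl, show ((6:Fin 8):Nat) = 6 from rfl, show ((7:Fin 8):Nat) = 7 from rfl]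
  push_cast
  ring

lemma pv_toMat_powLoop : ∀ (e : Nat) (R B : List (List Int)),
    pvToMat (pvPowLoop e R B) = pvToMat R * (pvToMat B) ^ e := by
  intro e
  induction e using Nat.strong_induction_on with
  | _ e ih =>
    intro R B
    match e with
    | 0 => simp [pvPowLoop]
    | (n + 1) =>
      rw [pvPowLoop, ih ((n + 1) / 2) (Nat.div_lt_self (Nat.succ_pos n) (by omega)),
          pv_toMat_matMult]
      have hsplit : (n + 1) % 2 + 2 * ((n + 1) / 2) = n + 1 := by omega
      by_cases h : (n + 1) % 2 = 1
      · rw [if_pos h, pv_toMat_matMult, mul_assoc]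
        congr 1
        rw [← sq, ← pow_mul, ← pow_succ']
        congr 1
        omega
      · rw [if_neg h]
        congr 1
        rw [← sq, ← pow_mul]
        congr 1
        omega

-- A's cache after the fold over range m is exactly the first m rows pvARow 0 .. pvARow (m-1)
lemma pv_cache_build (m : Nat) :
    (List.range m).foldl
      (fun cache d =>
        if d = 0 then cache ++ [[1, 0, 0, 0, 0, 0, 0, 0]]
        else cache ++ [pvStepRow (cache.getD (d - 1) [])]) [] =
    (List.range m).map pvARow := by
  induction m with
  | zero => simp
  | succ m ih =>
    rw [List.range_succ, List.foldl_append, List.map_append, ih]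
    match m with
    | 0 => simp [pvARow]
    | (k + 1) =>
      simp only [List.foldl]
      rw [if_neg (by omega)]
      rw [show k + 1 - 1 = k from rfl]
      rw [pv_getD_map_range pvARow [] (k + 1) k (by omega)]
      rfl

lemma pv_aRow_step (prev : List Int) :
    (fun i => ((pvStepRow prev).getD i.val 0 : ZMod 1000000007) : Fin 8 → ZMod 1000000007) =
      (pvToMat pvADJ).mulVec (fun i => ((prev.getD i.val 0 : Int) : ZMod 1000000007)) := by
  funext i
  rw [Matrix.mulVec, dotProduct, Fin.sum_univ_eight]
  fin_cases i <;>
    simp only [pvStepRow, pvPaths, List.map, List.foldl, List.getD_cons_zero,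
      List.getD_cons_succ, pv_cast_mod, pvToMat, pvADJ, show ((0:Fin 8):Nat) = 0 from rfl, show ((1:Fin 8):Nat) = 1 from rfl, show ((2:Fin 8):Nat) = 2 from rfl, show ((3:Fin 8):Nat) = 3 from rfl, show ((4:Fin 8):Nat) = 4 from rfl, show ((5:Fin 8):Nat) = 5 from rfl, show ((6:Fin 8):Nat) = 6 from rfl, show ((7:Fin 8):Nat) = 7 from rfl] <;>
    push_cast <;> ring

lemma pv_aRow_mat (d : Nat) :
    (fun i => (((pvARow d).getD i.val 0 : Int) : ZMod 1000000007) : Fin 8 → ZMod 1000000007) =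
      ((pvToMat pvADJ) ^ d).mulVec pvV0 := by
  induction d with
  | zero =>
    funext i
    rw [pow_zero, Matrix.one_mulVec]
    fin_cases i <;> simp [pvARow, pvV0]
  | succ d ih =>
    show (fun i : Fin 8 => (((pvStepRow (pvARow d)).getD i.val 0 : Int) : ZMod 1000000007)) = _
    rw [pv_aRow_step, ih, Matrix.mulVec_mulVec, ← pow_succ']

lemma pv_mulVec_v0 (M : Matrix (Fin 8) (Fin 8) (ZMod 1000000007)) (i : Fin 8) :
    M.mulVec pvV0 i = M i 0 := by
  rw [Matrix.mulVec, dotProduct, Fin.sum_univ_eight]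
  simp [pvV0, Fin.ext_iff]

lemma pv_toMat_ident : pvToMat pvIdent = 1 := by
  funext i j
  fin_cases i <;> fin_cases j <;> simp [pvToMat, pvIdent]

lemma pv_aRow_bounds (d : Nat) :
    0 ≤ (pvARow d).getD 0 0 ∧ (pvARow d).getD 0 0 < 1000000007 := by
  match d with
  | 0 => exact ⟨by norm_num [pvARow], by norm_num [pvARow]⟩
  | (k + 1) =>
    have : (pvARow (k + 1)).getD 0 0 =
        PySem.Int.mod (([1, 2] : List Nat).foldl (fun s j => s + (pvARow k).getD j 0) 0) pvMOD := by
      show (pvStepRow (pvARow k)).getD 0 0 = _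
      simp [pvStepRow, pvPaths]
    rw [this]
    exact ⟨PySem.Int.mod_nonneg _ (by norm_num [pvMOD]),
           by simpa [pvMOD] using PySem.Int.mod_lt (([1, 2] : List Nat).foldl (fun s j => s + (pvARow k).getD j 0) 0) (b := pvMOD) (by norm_num [pvMOD])⟩

lemma pv_int_eq_of_cast {a b : Int} (ha0 : 0 ≤ a) (ha : a < 1000000007)
    (hb0 : 0 ≤ b) (hb : b < 1000000007)
    (h : (a : ZMod 1000000007) = (b : ZMod 1000000007)) : a = b := by
  have := (ZMod.intCast_eq_intCast_iff a b 1000000007).mp h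
  have hmod : a % 1000000007 = b % 1000000007 := by exact_mod_cast this
  rwa [Int.emod_eq_of_lt ha0 ha, Int.emod_eq_of_lt hb0 hb] at hmod

-- ===== VERDICT (by name: the statement is the Claim_ definition above) =====
theorem get_path_count_spec : Claim_equal_get_path_count := by
  intro D _ _
  show get_path_count D = get_path_count_alt D
  unfold get_path_count get_path_count_alt
  rw [pv_cache_build (D.toNat + 1)]
  show ((List.map pvARow (List.range (D.toNat + 1))).getD D.toNat []).getD 0 0 = _
  rw [pv_getD_map_range pvARow [] (D.toNat + 1) D.toNat (by omega)]
  set n := D.toNat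
  -- both sides are in [0, 1000000007) and have the same image in ZMod 1000000007
  have hA : (((pvARow n).getD 0 0 : Int) : ZMod 1000000007) =
      ((pvToMat pvADJ) ^ n) 0 0 := by
    have := congrFun (pv_aRow_mat n) 0
    rwa [pv_mulVec_v0] at this
  have hB : ((PySem.Int.mod (((pvPowLoop n pvIdent pvADJ).getD 0 []).getD 0 0) pvMOD : Int) :
      ZMod 1000000007) = ((pvToMat pvADJ) ^ n) 0 0 := by
    rw [pv_cast_mod]
    have := congrFun (congrFun (pv_toMat_powLoop n pvIdent pvADJ) 0) 0
    rw [pv_toMat_ident, one_mul] at this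
    exact this
  obtain ⟨ha0, ha1⟩ := pv_aRow_bounds n
  exact pv_int_eq_of_cast ha0 ha1
    (PySem.Int.mod_nonneg _ (by norm_num [pvMOD]))
    (by simpa [pvMOD] using PySem.Int.mod_lt (((pvPowLoop n pvIdent pvADJ).getD 0 []).getD 0 0) (b := pvMOD) (by norm_num [pvMOD]))
    (hA.trans hB.symm)
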